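-- pv_equiv track=rewrite | github.com/KIM-KYOUNG-OH/Algorithm-by-python | 프로그래머스/level2/n^2배열 자르기.py | solution
-- ===== SOURCE A (Python) =====
-- def solution(n, left, right):
--     answer = []
--     for i in range(left, right + 1):
--         share = i // n
--         remainder = i % n
--         bigger = share
--         if share < remainder:
--             bigger = remainder
--         answer.append(bigger + 1)
--     return answer
-- ===== SOURCE B (Python) =====
-- def solution(n, left, right):
--     # Generate the answer row by row as runs: row r of the flattened array is
--     # (r+1) copies of r+1 followed by r+2..n; emit only each row's segment that
--     # falls inside the index window [left, right].
--     lo, hi = left, right + 1              # half-open index window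
--     out = []
--     if lo < hi:
--         for r in range(max(lo // n, 0), (hi + n - 1) // n):
--             c0 = lo - r * n if r * n < lo else 0
--             c1 = hi - r * n if hi < r * n + n else n
--             const_end = min(c1, r + 1)
--             if c0 < const_end:
--                 out += [r + 1] * (const_end - c0)
--             out += list(range(max(c0, r + 1) + 1, c1 + 1))
--     return out
-- ===== Notes on version B (the rewrite author's own statement) =====
-- stated objective: alternative
-- what changed: B generates the answer row by row as runs - each row of the flattened array is a repeated block of r+1 followed by the arithmetic range r+2..n, and B emits only each row's segment inside [left, right] - instead of A's per-index floor-division/modulo formula over range(left, right+1).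
-- outside the precondition, e.g. on solution(3, -2, 5): A returns [2, 3, 1, 2, 3, 2, 2, 3], B returns [1, 2, 3, 2, 2, 3]; on solution(-2, 0, 3): A returns [1, 0, 1, 0], B returns []
import Mathlib
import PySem

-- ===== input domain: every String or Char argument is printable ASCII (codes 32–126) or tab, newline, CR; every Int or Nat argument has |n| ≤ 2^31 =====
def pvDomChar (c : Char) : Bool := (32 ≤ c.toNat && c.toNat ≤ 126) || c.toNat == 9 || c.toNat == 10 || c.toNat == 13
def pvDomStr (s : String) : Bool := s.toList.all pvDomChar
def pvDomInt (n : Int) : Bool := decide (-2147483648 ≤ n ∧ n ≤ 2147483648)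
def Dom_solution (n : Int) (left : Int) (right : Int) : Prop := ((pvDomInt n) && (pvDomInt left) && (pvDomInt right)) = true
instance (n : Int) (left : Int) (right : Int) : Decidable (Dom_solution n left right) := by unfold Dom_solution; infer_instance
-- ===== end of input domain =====

-- B emits the answer row by row as runs (a repeated block plus an arithmetic range per row,
-- restricted to the window) instead of A's per-index divmod; objective: alternative.

-- ===== PORT A =====
def solution (n : Int) (left : Int) (right : Int) : List Int :=
  (PySem.List.pyRange left (right + 1) 1).foldl
    (fun answer i =>
      let share := PySem.Int.floordiv i n
      let remainder := PySem.Int.mod i n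
      let bigger := share
      let bigger := if share < remainder then remainder else bigger
      answer ++ [bigger + 1]) []

-- ===== PORT B =====
def solution_alt (n : Int) (left : Int) (right : Int) : List Int :=
  let lo := left
  let hi := right + 1
  if lo < hi then
    (PySem.List.pyRange (max (PySem.Int.floordiv lo n) 0)
        (PySem.Int.floordiv (hi + n - 1) n) 1).foldl
      (fun out r =>
        let c0 := if r * n < lo then lo - r * n else 0
        let c1 := if hi < r * n + n then hi - r * n else n
        let constEnd := min c1 (r + 1)
        let out := if c0 < constEnd then out ++ PySem.List.pyRepeat [r + 1] (constEnd - c0) else out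
        out ++ PySem.List.pyRange (max c0 (r + 1) + 1) (c1 + 1) 1) []
  else []

-- ===== PRECONDITION & SPEC =====
-- Pre_ admits every query starting inside-or-at the array front (n ≥ 1, 0 ≤ left, right ≥ -1,
-- possibly empty or past the end) plus every empty query for n ≤ 0. Excluded are inputs on which
-- A still returns but the value is an artefact no caller of this task would specify: negative
-- left or right < -1 (A's floor division extrapolates its formula to negative indices, B starts
-- at the array front) and n < 0 with a nonempty range (A returns divisor-sign floor-division
-- artefacts for a negative board size, B returns []); n = 0 with a nonempty range is where A
-- raises ZeroDivisionError (and so does B).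
def Pre_solution (n : Int) (left : Int) (right : Int) : Prop :=
  (1 ≤ n ∧ 0 ≤ left ∧ -1 ≤ right) ∨ (n ≤ 0 ∧ right < left)
instance (n : Int) (left : Int) (right : Int) : Decidable (Pre_solution n left right) := by unfold Pre_solution; infer_instance
def pvWitness_solution : Int × Int × Int := (3, 2, 5)
def Spec_solution (n : Int) (left : Int) (right : Int) (out : List Int) : Prop := out = solution_alt n left right
instance (n : Int) (left : Int) (right : Int) (out : List Int) : Decidable (Spec_solution n left right out) := by unfold Spec_solution; infer_instance

-- ===== CLAIM (what is proved, stated in full; the proofs are below) =====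
def Claim_equal_solution : Prop := ∀ (n : Int) (left : Int) (right : Int), Dom_solution n left right → Pre_solution n left right → Spec_solution n left right (solution n left right)

-- ===== LEMMAS AND PROOFS =====

-- the per-element value, on nonnegative i with n ≥ 1 (where floordiv/mod are ediv/emod)
def pvVal (n i : Int) : Int := (if i / n < i % n then i % n else i / n) + 1

-- one row's contribution of B's loop (the loop body's value, as an appended segment)
def pvSeg (n lo hi r : Int) : List Int :=
  let c0 := if r * n < lo then lo - r * n else 0
  let c1 := if hi < r * n + n then hi - r * n else n
  let constEnd := min c1 (r + 1)
  (if c0 < constEnd then PySem.List.pyRepeat [r + 1] (constEnd - c0) else []) ++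
    PySem.List.pyRange (max c0 (r + 1) + 1) (c1 + 1) 1

lemma pv_val_at (n k c : Int) (hn : 0 < n) (hc0 : 0 ≤ c) (hcn : c < n) :
    pvVal n (k * n + c) = max k c + 1 := by
  have hq : (k * n + c) / n = k := by
    rw [show k * n + c = c + n * k from by ring, Int.add_mul_ediv_left c k (by omega : n ≠ 0),
      Int.ediv_eq_zero_of_lt hc0 hcn]; omega
  have hr : (k * n + c) % n = c := by
    rw [show k * n + c = c + n * k from by ring, Int.add_mul_emod_self_left,
      Int.emod_eq_of_lt hc0 hcn]
  unfold pvVal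
  rw [hq, hr]
  rcases lt_or_ge k c with h | h
  · rw [if_pos h, max_eq_right h.le]
  · rw [if_neg (not_lt.mpr h), max_eq_left h]

-- A is the map of pvVal over its index range
lemma pv_solution_eq_map (n left right : Int) (hn : 0 < n) :
    solution n left right = (PySem.List.pyRange left (right + 1) 1).map (pvVal n) := by
  unfold solution
  rw [PySem.List.foldl_append_singleton_eq_map]
  simp only [List.nil_append]
  apply List.map_congr_left
  intro i _
  unfold pvVal
  rw [PySem.Int.floordiv_eq_ediv_of_pos hn, PySem.Int.mod_eq_emod_of_pos hn]

-- B's loop (on a nonempty window) is the concatenation of its rows' segments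
lemma pv_alt_eq_flatMap (n left right : Int) (h : left < right + 1) :
    solution_alt n left right
      = (PySem.List.pyRange (max (PySem.Int.floordiv left n) 0)
          (PySem.Int.floordiv (right + 1 + n - 1) n) 1).flatMap (pvSeg n left (right + 1)) := by
  unfold solution_alt
  simp only []
  rw [if_pos h]
  trans ((PySem.List.pyRange (max (PySem.Int.floordiv left n) 0)
      (PySem.Int.floordiv (right + 1 + n - 1) n) 1).foldl
      (fun out r => out ++ pvSeg n left (right + 1) r) [])
  · apply PySem.List.foldl_congr_mem
    intro acc r _
    unfold pvSeg
    simp only []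
    split_ifs <;> simp
  · rw [PySem.List.foldl_append_eq_flatMap, List.nil_append]

-- an integer shift of an index range
lemma pv_range_shift (a c0 c1 : Int) :
    PySem.List.pyRange (a + c0) (a + c1) 1 = (PySem.List.pyRange c0 c1 1).map (fun c => a + c) := by
  rw [PySem.List.pyRange_one, PySem.List.pyRange_one,
    show a + c1 - (a + c0) = c1 - c0 from by ring, List.map_map]
  apply List.map_congr_left
  intro k _
  simp only [Function.comp_apply]
  ring

-- the bracket of floor division by a positive divisor
lemma pv_fd_bracket (a b : Int) (hb : 0 < b) :
    (PySem.Int.floordiv a b) * b ≤ a ∧ a < (PySem.Int.floordiv a b) * b + b := by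
  have h := (PySem.Int.floordiv_eq_iff_of_pos hb).mp (rfl : PySem.Int.floordiv a b = _)
  exact ⟨h.1, by nlinarith [h.2]⟩

-- one segment is the value map over the row's clamped index interval
lemma pv_seg_eq (n lo hi r : Int) (hn : 0 < n) (_hlo : 0 ≤ lo) :
    pvSeg n lo hi r
      = (PySem.List.pyRange (max lo (r * n)) (min hi (r * n + n)) 1).map (pvVal n) := by
  unfold pvSeg
  simp only []
  set c0 : Int := if r * n < lo then lo - r * n else 0 with hc0def
  set c1 : Int := if hi < r * n + n then hi - r * n else n with hc1def
  have hc0 : 0 ≤ c0 := by rw [hc0def]; split_ifs <;> omega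
  have hc1n : c1 ≤ n := by rw [hc1def]; split_ifs <;> omega
  have hstart : max lo (r * n) = r * n + c0 := by rw [hc0def]; split_ifs <;> omega
  have hend : min hi (r * n + n) = r * n + c1 := by rw [hc1def]; split_ifs <;> omega
  rw [hstart, hend, pv_range_shift (r * n) c0 c1, List.map_map]
  have hval : ∀ c ∈ PySem.List.pyRange c0 c1 1, pvVal n (r * n + c) = max r c + 1 := by
    intro c hc
    obtain ⟨h1, h2⟩ := PySem.List.mem_pyRange_one.mp hc
    exact pv_val_at n r c hn (by omega) (by omega)
  rw [List.map_congr_left (fun c hc => by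
    simp only [Function.comp_apply]; exact hval c hc)]
  by_cases hcc : c1 ≤ c0
  · -- row outside the window: everything is empty
    rw [PySem.List.pyRange_one_eq_nil hcc, List.map_nil]
    have h1 : ¬ (c0 < min c1 (r + 1)) := by omega
    rw [if_neg h1, List.nil_append, PySem.List.pyRange_one_eq_nil (by omega)]
  · push Not at hcc
    set mid : Int := max c0 (min c1 (r + 1)) with hmid
    rw [PySem.List.pyRange_one_append c0 mid c1 (by omega) (by omega), List.map_append]
    congr 1
    · -- the constant run
      have hconst : ∀ c ∈ PySem.List.pyRange c0 mid 1, max r c + 1 = r + 1 := by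
        intro c hc
        obtain ⟨h1, h2⟩ := PySem.List.mem_pyRange_one.mp hc
        have : c ≤ r := by omega
        rw [max_eq_left this]
      rw [List.map_congr_left hconst]
      by_cases hrun : c0 < min c1 (r + 1)
      · rw [if_pos hrun, PySem.List.pyRepeat_singleton]
        have hm : mid = min c1 (r + 1) := by omega
        rw [List.map_const', PySem.List.length_pyRange_one, hm]
      · rw [if_neg hrun]
        have hm : mid = c0 := by omega
        rw [hm, PySem.List.pyRange_one_eq_nil le_rfl, List.map_nil]
    · -- the increasing tail
      by_cases htail : r + 1 < c1
      · have hm : mid = max c0 (r + 1) := by omega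
        have hshift := pv_range_shift 1 mid c1
        have hplus : ∀ c ∈ PySem.List.pyRange mid c1 1, max r c + 1 = 1 + c := by
          intro c hc
          obtain ⟨h1, h2⟩ := PySem.List.mem_pyRange_one.mp hc
          have : r ≤ c := by omega
          rw [max_eq_right this]; ring
        rw [List.map_congr_left hplus, ← hshift, hm,
          show (1 : Int) + max c0 (r + 1) = max c0 (r + 1) + 1 from by ring,
          show (1 : Int) + c1 = c1 + 1 from by ring]
      · have hm : mid = c1 := by omega
        rw [hm, PySem.List.pyRange_one_eq_nil le_rfl, List.map_nil,
          PySem.List.pyRange_one_eq_nil (by omega)]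

-- concatenating k segments from the first row gives the first min hi ((R0+k)·n) values
lemma pv_blocks (n lo hi : Int) (hn : 0 < n) (hlo : 0 ≤ lo) (k : Nat) :
    (PySem.List.pyRange (PySem.Int.floordiv lo n) (PySem.Int.floordiv lo n + k) 1).flatMap
        (pvSeg n lo hi)
      = (PySem.List.pyRange lo (min hi ((PySem.Int.floordiv lo n + k) * n)) 1).map (pvVal n) := by
  obtain ⟨hbr1, hbr2⟩ := pv_fd_bracket lo n hn
  set R0 : Int := PySem.Int.floordiv lo n with hR0
  induction k with
  | zero =>
    simp only [Nat.cast_zero, add_zero]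
    rw [PySem.List.pyRange_one_eq_nil le_rfl, PySem.List.pyRange_one_eq_nil (by omega)]
    rfl
  | succ k ih =>
    have hstep : PySem.List.pyRange R0 (R0 + ((k + 1 : Nat) : Int)) 1
        = PySem.List.pyRange R0 (R0 + (k : Int)) 1 ++ [R0 + (k : Int)] := by
      push_cast
      rw [show R0 + ((k : Int) + 1) = (R0 + (k : Int)) + 1 from by ring]
      exact PySem.List.pyRange_one_succ_right (by omega)
    rw [hstep, List.flatMap_append, ih]
    simp only [List.flatMap_cons, List.flatMap_nil, List.append_nil]
    rw [pv_seg_eq n lo hi (R0 + (k : Int)) hn hlo]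
    have hmul : (R0 + ((k + 1 : Nat) : Int)) * n = (R0 + (k : Int)) * n + n := by push_cast; ring
    by_cases hk0 : (R0 + (k : Int)) * n ≤ lo
    · -- first (possibly partial) row: everything before it is empty
      have h1 : PySem.List.pyRange lo (min hi ((R0 + (k : Int)) * n)) 1 = [] :=
        PySem.List.pyRange_one_eq_nil (by omega)
      have h2 : max lo ((R0 + (k : Int)) * n) = lo := by omega
      rw [h1, List.map_nil, List.nil_append, h2, hmul]
    · push Not at hk0
      by_cases hhi : hi ≤ (R0 + (k : Int)) * n
      · -- the window ends before this row: its segment is empty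
        have h1 : min hi ((R0 + (k : Int)) * n) = hi := by omega
        have h2 : PySem.List.pyRange (max lo ((R0 + (k : Int)) * n))
            (min hi ((R0 + (k : Int)) * n + n)) 1 = [] :=
          PySem.List.pyRange_one_eq_nil (by omega)
        have h3 : min hi ((R0 + ((k + 1 : Nat) : Int)) * n) = hi := by rw [hmul]; omega
        rw [h1, h2, List.map_nil, List.append_nil, h3]
      · -- glue the previous values and this row's segment
        push Not at hhi
        have h1 : min hi ((R0 + (k : Int)) * n) = (R0 + (k : Int)) * n := by omega
        have h2 : max lo ((R0 + (k : Int)) * n) = (R0 + (k : Int)) * n := by omega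
        have h3 : min hi ((R0 + (k : Int)) * n + n)
            = min hi ((R0 + ((k + 1 : Nat) : Int)) * n) := by rw [hmul]
        rw [h1, h2, h3, ← List.map_append, ← PySem.List.pyRange_one_append lo
          ((R0 + (k : Int)) * n) (min hi ((R0 + ((k + 1 : Nat) : Int)) * n)) (by omega)
          (by rw [hmul]; omega)]

-- B's full value on a nonempty window (n ≥ 1, 0 ≤ left < right + 1)
lemma pv_alt_eq_map (n left right : Int) (hn : 0 < n) (hl : 0 ≤ left)
    (hlohi : left < right + 1) :
    solution_alt n left right
      = (PySem.List.pyRange left (right + 1) 1).map (pvVal n) := by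
  obtain ⟨ha1, ha2⟩ := pv_fd_bracket left n hn
  obtain ⟨hb1, hb2⟩ := pv_fd_bracket (right + 1 + n - 1) n hn
  set R0 : Int := PySem.Int.floordiv left n with hR0
  set R1 : Int := PySem.Int.floordiv (right + 1 + n - 1) n with hR1
  have hR0n : 0 ≤ R0 := by nlinarith
  have hR1hi : right + 1 ≤ R1 * n := by omega
  have hR01 : R0 ≤ R1 := by nlinarith
  have hmax : max R0 0 = R0 := by omega
  rw [pv_alt_eq_flatMap n left right hlohi, ← hR0, ← hR1, hmax]
  have hcast : R0 + ((R1 - R0).toNat : Int) = R1 := by omega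
  have hblocks := pv_blocks n left (right + 1) hn hl (R1 - R0).toNat
  rw [← hR0, hcast] at hblocks
  rw [hblocks]
  congr 2
  omega

-- ===== VERDICT (by name: the statement is the Claim_ definition above) =====
theorem solution_spec : Claim_equal_solution := by
  unfold Claim_equal_solution
  intro n left right _ hpre
  unfold Spec_solution
  rcases hpre with ⟨hn, hl, hr⟩ | ⟨hn, hlr⟩
  case inr =>
    -- n ≤ 0 and an empty query: A's range is empty and B's window guard fires
    unfold solution solution_alt
    rw [PySem.List.pyRange_one_eq_nil (by omega : right + 1 ≤ left), List.foldl_nil]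
    simp only []
    rw [if_neg (by omega : ¬ (left < right + 1))]
  case inl =>
    have hn0 : 0 < n := hn
    rcases lt_or_ge left (right + 1) with hlr | hlr
    · rw [pv_alt_eq_map n left right hn0 hl hlr]
      exact pv_solution_eq_map n left right hn0
    · -- empty query: both sides are []
      unfold solution solution_alt
      rw [PySem.List.pyRange_one_eq_nil (by omega : right + 1 ≤ left), List.foldl_nil]
      simp only []
      rw [if_neg (by omega : ¬ (left < right + 1))]
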